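-- pv_equiv track=rewrite | github.com/vishalkoc2016/Striver_A2Z_DSA_Python | 3645-maximize-the-number-of-target-nodes-after-connecting-trees-ii/3645-maximize-the-number-of-target-nodes-after-connecting-trees-ii.py | bfs
-- ===== SOURCE A (Python) =====
-- from collections import deque
-- from typing import List, Optional
--
-- def bfs(start: int, adj: List[List[int]], included: Optional[List[bool]] = None) -> int:
--     q = deque()
--     q.append((start, -1))
--     count = 0
--     level = 0
--
--     while q:
--         size = len(q)
--         # on even levels we both add to count and (optionally) record the nodes
--         if level % 2 == 0:
--             count += size
--
--         for _ in range(size):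
--             curr, parent = q.popleft()
--             if included is not None and level % 2 == 0:
--                 # mark this node as "included"
--                 included[curr] = True
--             for v in adj[curr]:
--                 if v == parent:
--                     continue
--                 q.append((v, curr))
--         level += 1
--     return count
-- ===== SOURCE B (Python) =====
-- def bfs(start, adj, included=None):
--     # Depth-first traversal with an explicit stack instead of A's level-by-level
--     # BFS: each popped entry carries its own depth, count/marking is decided by
--     # that node's depth parity, so there is no queue, no per-level batch loop
--     # and no level counter.  Marks `included` exactly like A (same set of
--     # True assignments, different order -- idempotent, so same final list).
--     count = 0
--     stack = [(start, -1, 0)]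
--     while stack:
--         curr, parent, depth = stack.pop()
--         if depth % 2 == 0:
--             count += 1
--             if included is not None:
--                 included[curr] = True
--         for v in adj[curr]:
--             if v != parent:
--                 stack.append((v, curr, depth + 1))
--     return count
-- ===== Notes on version B (the rewrite author's own statement) =====
-- stated objective: alternative
-- what changed: replaces A's level-by-level BFS (deque, per-level batch loop over range(size), level counter) with a depth-first traversal on an explicit stack where every entry carries its own depth and counting/marking is decided per node by depth parity
import Mathlib
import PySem

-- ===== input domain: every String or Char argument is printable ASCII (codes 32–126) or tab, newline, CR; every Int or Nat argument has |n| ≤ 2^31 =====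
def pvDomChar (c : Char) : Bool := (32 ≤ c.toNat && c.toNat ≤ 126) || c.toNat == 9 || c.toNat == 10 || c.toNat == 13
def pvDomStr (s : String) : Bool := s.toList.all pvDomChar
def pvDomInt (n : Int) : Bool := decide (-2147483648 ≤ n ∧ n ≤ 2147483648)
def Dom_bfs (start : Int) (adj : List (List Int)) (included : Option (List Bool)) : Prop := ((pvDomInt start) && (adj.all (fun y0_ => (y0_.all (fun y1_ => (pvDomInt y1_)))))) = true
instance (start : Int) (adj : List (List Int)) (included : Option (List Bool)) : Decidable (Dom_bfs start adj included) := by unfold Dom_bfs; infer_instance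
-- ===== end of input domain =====

-- B replaces A's level-by-level BFS by a depth-first traversal on an explicit stack
-- carrying each node's depth; A mutates `included` in place, B performs the same set of
-- (idempotent) assignments, and the equivalence proved here is about the RETURN value only.

-- ===== PORT A =====
-- `included[curr] = True` (negative index from the end; out-of-range would raise
-- IndexError in Python — those inputs are excluded by Pre_bfs, here the list is
-- returned unchanged)
def pySetBool (l : List Bool) (i : Int) : List Bool :=
  let j : Int := if i < 0 then i + l.length else i
  if 0 ≤ j ∧ j < (l.length : Int) then l.set j.toNat true else l

-- the `for _ in range(size)` loop: pop from the left, optionally mark, append children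
def innerA (adj : List (List Int)) (mark : Bool) :
    Nat → List (Int × Int) → Option (List Bool) → List (Int × Int) × Option (List Bool)
  | 0, q, inc => (q, inc)
  | _ + 1, [], inc => ([], inc)   -- unreachable: the loop runs len(q) times
  | k + 1, (curr, parent) :: rest, inc =>
      let inc := if mark then inc.map (fun l => pySetBool l curr) else inc
      let q := ((PySem.List.pyGet? adj curr).getD []).foldl
        (fun qq v => if v = parent then qq else qq ++ [(v, curr)]) rest
      innerA adj mark k q inc

-- the `while q:` loop; the fuel argument only makes the recursion total (Pre_bfs
-- restricts to inputs on which the Python loop terminates, within pvFuelBfs levels)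
def whileA (adj : List (List Int)) :
    Nat → List (Int × Int) → Int → Int → Option (List Bool) → Int
  | 0, _, _, count, _ => count
  | _ + 1, [], _, count, _ => count
  | f + 1, q, level, count, inc =>
      let size := q.length
      let count := if level % 2 = 0 then count + (size : Int) else count
      let mark := inc.isSome && decide (level % 2 = 0)
      let r := innerA adj mark size q inc
      whileA adj f r.1 (level + 1) count r.2

-- fuel bound for A's loop (totality only): more than the number of (node, parent)
-- walk states, hence more levels than any terminating run of the Python uses
def pvFuelBfs (adj : List (List Int)) : Nat :=
  2 * ((adj.map List.length).sum + 2) * ((adj.map List.length).sum + 2) + 2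

def bfs (start : Int) (adj : List (List Int)) (included : Option (List Bool)) : Int :=
  whileA adj (pvFuelBfs adj) [(start, -1)] 0 0 included

-- ===== PORT B =====
-- the children `[(v, curr) for v in adj[curr] if v != parent]` of a walk state
def chd (adj : List (List Int)) (s : Int × Int) : List (Int × Int) :=
  (((PySem.List.pyGet? adj s.1).getD []).filter (fun v => v ≠ s.2)).map (fun v => (v, s.1))

-- size of the walk tree truncated at depth `f` (computes the DFS fuel below:
-- one unit per pop of B's loop; the depth cap only makes the recursion total)
def tsz (adj : List (List Int)) : Nat → Int × Int → Nat
  | 0, _ => 1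
  | f + 1, s => 1 + ((chd adj s).map (tsz adj f)).sum

-- the `while stack:` loop of B: pop the top entry, count/mark by its own depth
-- parity, push the non-parent neighbours (stack stored top-first, so the cons
-- fold realises Python's append-then-pop-from-the-end order exactly); the fuel
-- argument only makes the recursion total — it bounds the number of pops
def loopD (adj : List (List Int)) :
    Nat → List (Int × Int × Int) → Int → Option (List Bool) → Int
  | 0, _, count, _ => count
  | _ + 1, [], count, _ => count
  | f + 1, (curr, parent, depth) :: rest, count, inc =>
      let count := if depth % 2 = 0 then count + 1 else count
      let inc := if depth % 2 = 0 then inc.map (fun l => pySetBool l curr) else inc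
      let stack := ((PySem.List.pyGet? adj curr).getD []).foldl
        (fun st v => if v = parent then st else (v, curr, depth + 1) :: st) rest
      loopD adj f stack count inc

def bfs_alt (start : Int) (adj : List (List Int)) (included : Option (List Bool)) : Int :=
  loopD adj (tsz adj (pvFuelBfs adj) (start, -1)) [(start, -1, 0)] 0 included

-- ===== PRECONDITION & SPEC =====
-- Pre_bfs is A's exact domain, stated as a property of the walk tree of states
-- (node, parent): starting from (start, -1), every reachable node must index into
-- adj (else Python's adj[curr] raises IndexError), every even-depth reachable node
-- must index into `included` when it is given (else included[curr]=True raises),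
-- and every root-path must have length < pvFuelBfs adj — on a terminating input the
-- states on a path are pairwise distinct, so paths are shorter than that bound, and
-- an infinite walk (a reachable cycle, on which the Python never returns) fails it.
def pvOK (adj : List (List Int)) (inc : Option (List Bool)) : Nat → Int × Int → Bool → Bool
  | 0, _, _ => false
  | f + 1, s, b =>
      decide (-(adj.length : Int) ≤ s.1 ∧ s.1 < (adj.length : Int)) &&
      (match inc with
       | none => true
       | some l => !b || decide (-(l.length : Int) ≤ s.1 ∧ s.1 < (l.length : Int))) &&
      (chd adj s).all (fun c => pvOK adj inc f c (!b))

def Pre_bfs (start : Int) (adj : List (List Int)) (included : Option (List Bool)) : Prop :=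
  pvOK adj included (pvFuelBfs adj) (start, -1) true = true

instance (start : Int) (adj : List (List Int)) (included : Option (List Bool)) : Decidable (Pre_bfs start adj included) := by unfold Pre_bfs; infer_instance

def pvWitness_bfs : Int × List (List Int) × Option (List Bool) := (0, [[1], [0]], none)

def Spec_bfs (start : Int) (adj : List (List Int)) (included : Option (List Bool)) (out : Int) : Prop := out = bfs_alt start adj included
instance (start : Int) (adj : List (List Int)) (included : Option (List Bool)) (out : Int) : Decidable (Spec_bfs start adj included out) := by unfold Spec_bfs; infer_instance

-- ===== CLAIM (what is proved, stated in full; the proofs are below) =====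
def Claim_equal_bfs : Prop := ∀ (start : Int) (adj : List (List Int)) (included : Option (List Bool)), Dom_bfs start adj included → Pre_bfs start adj included → Spec_bfs start adj included (bfs start adj included)

-- ===== LEMMAS AND PROOFS =====

-- the common yardstick: number of even-depth states in the walk tree, truncated at depth f
def cnt (adj : List (List Int)) : Nat → Int × Int → Bool → Int
  | 0, _, _ => 0
  | f + 1, s, b => (if b then 1 else 0) + ((chd adj s).map (fun c => cnt adj f c (!b))).sum

-- `expandB q` = next BFS level of queue q
def expandB (adj : List (List Int)) (q : List (Int × Int)) : List (Int × Int) :=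
  q.flatMap (chd adj)

-- one-step unfolding of pvOK at a successor cap
theorem pvOK_succ (adj : List (List Int)) (inc : Option (List Bool)) (f : Nat)
    (s : Int × Int) (b : Bool) :
    pvOK adj inc (f + 1) s b
      = (decide (-(adj.length : Int) ≤ s.1 ∧ s.1 < (adj.length : Int)) &&
         (match inc with
          | none => true
          | some l => !b || decide (-(l.length : Int) ≤ s.1 ∧ s.1 < (l.length : Int))) &&
         (chd adj s).all (fun c => pvOK adj inc f c (!b))) := rfl

theorem foldl_push (c p : Int) (l : List Int) (init : List (Int × Int)) :
    l.foldl (fun qq v => if v = p then qq else qq ++ [(v, c)]) init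
      = init ++ (l.filter (fun v => v ≠ p)).map (fun v => (v, c)) := by
  induction l generalizing init with
  | nil => simp
  | cons x xs ih => by_cases h : x = p <;> simp [List.foldl_cons, h, ih]

theorem expandB_cons (adj : List (List Int)) (x : Int × Int) (L : List (Int × Int)) :
    expandB adj (x :: L) = chd adj x ++ expandB adj L := by
  simp [expandB]

-- popping len(L) elements off L ++ T and appending children yields T ++ expandB L
theorem innerA_spec (adj : List (List Int)) (mark : Bool) :
    ∀ (L T : List (Int × Int)) (inc : Option (List Bool)),
      (innerA adj mark L.length (L ++ T) inc).1 = T ++ expandB adj L := by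
  intro L
  induction L with
  | nil => intro T inc; simp [innerA, expandB]
  | cons x L ih =>
      intro T inc
      obtain ⟨c, p⟩ := x
      show (innerA adj mark (L.length + 1) ((c, p) :: (L ++ T)) inc).1 = _
      rw [innerA]
      rw [foldl_push]
      rw [show L ++ T ++ ((((PySem.List.pyGet? adj c).getD []).filter (fun v => v ≠ p)).map
            (fun v => (v, c)))
          = L ++ (T ++ (((PySem.List.pyGet? adj c).getD []).filter (fun v => v ≠ p)).map
            (fun v => (v, c))) from by simp]
      rw [ih]
      rw [expandB_cons]
      simp [chd]

theorem parity_step (l : Int) : (decide ((l + 1) % 2 = 0)) = !(decide (l % 2 = 0)) := by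
  rcases Int.emod_two_eq l with h | h <;> simp [Int.add_emod, h]

-- one BFS level of cnt
theorem cnt_level (adj : List (List Int)) (f : Nat) (b : Bool) :
    ∀ q : List (Int × Int),
      (q.map (fun s => cnt adj (f + 1) s b)).sum
        = (if b then (q.length : Int) else 0)
          + ((expandB adj q).map (fun s => cnt adj f s (!b))).sum := by
  intro q
  induction q with
  | nil => simp [expandB]
  | cons x q ih =>
      rw [List.map_cons, List.sum_cons, ih, expandB_cons, List.map_append, List.sum_append]
      rw [show cnt adj (f + 1) x b
            = (if b then 1 else 0) + ((chd adj x).map (fun c => cnt adj f c (!b))).sum from rfl]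
      cases b <;> simp <;> push_cast <;> ring

-- A's loop counts cnt of its queue
theorem whileA_spec (adj : List (List Int)) :
    ∀ (f : Nat) (q : List (Int × Int)) (level count : Int) (inc : Option (List Bool)),
      whileA adj f q level count inc
        = count + (q.map (fun s => cnt adj f s (decide (level % 2 = 0)))).sum := by
  intro f
  induction f with
  | zero => intro q level count inc; simp [whileA, cnt]
  | succ f ih =>
      intro q level count inc
      match q with
      | [] => simp [whileA]
      | x :: q' =>
          have hq : (innerA adj (inc.isSome && decide (level % 2 = 0))
              (x :: q').length (x :: q') inc).1 = expandB adj (x :: q') := by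
            have := innerA_spec adj (inc.isSome && decide (level % 2 = 0)) (x :: q') [] inc
            simpa using this
          rw [whileA]
          · simp only [hq]
            rw [ih, parity_step, cnt_level]
            by_cases h : level % 2 = 0 <;> simp [h] <;> push_cast <;> ring
          · simp

-- pvOK is monotone in the depth cap
theorem pvOK_mono (adj : List (List Int)) (inc : Option (List Bool)) :
    ∀ (f : Nat) (s : Int × Int) (b : Bool),
      pvOK adj inc f s b = true → pvOK adj inc (f + 1) s b = true := by
  intro f
  induction f with
  | zero => intro s b h; simp [pvOK] at h
  | succ f ih =>
      intro s b h
      rw [pvOK_succ] at h ⊢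
      simp only [Bool.and_eq_true, List.all_eq_true] at h ⊢
      exact ⟨h.1, fun c hc => ih c (!b) (h.2 c hc)⟩

-- children of a pvOK state are pvOK (with flipped parity, same cap)
theorem pvOK_child (adj : List (List Int)) (inc : Option (List Bool)) (f : Nat)
    (s : Int × Int) (b : Bool) (h : pvOK adj inc f s b = true)
    (c : Int × Int) (hc : c ∈ chd adj s) : pvOK adj inc f c (!b) = true := by
  match f with
  | 0 => simp [pvOK] at h
  | f + 1 =>
      rw [pvOK_succ] at h
      simp only [Bool.and_eq_true, List.all_eq_true] at h
      exact pvOK_mono adj inc f c (!b) (h.2 c hc)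

-- cnt stabilises once the cap exceeds the tree depth
theorem cnt_stab (adj : List (List Int)) (inc : Option (List Bool)) :
    ∀ (f g : Nat) (s : Int × Int) (b : Bool), pvOK adj inc f s b = true → f ≤ g →
      cnt adj g s b = cnt adj f s b := by
  intro f
  induction f with
  | zero => intro g s b h _; simp [pvOK] at h
  | succ f ih =>
      intro g s b h hfg
      match g, hfg with
      | g + 1, hfg =>
          rw [pvOK_succ] at h
          simp only [Bool.and_eq_true, List.all_eq_true] at h
          rw [cnt, cnt]
          congr 1
          apply congrArg
          apply List.map_congr_left
          intro c hc
          exact ih g c (!b) (h.2 c hc) (Nat.le_of_succ_le_succ hfg)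

-- fixed-point identity for cnt on pvOK states
theorem cnt_fix (adj : List (List Int)) (inc : Option (List Bool)) (g : Nat)
    (s : Int × Int) (b : Bool) (h : pvOK adj inc g s b = true) :
    cnt adj g s b = (if b then 1 else 0) + ((chd adj s).map (fun c => cnt adj g c (!b))).sum := by
  have h1 := cnt_stab adj inc g (g + 1) s b h (Nat.le_succ g)
  rw [← h1, cnt]

-- tsz stabilises the same way
theorem tsz_stab (adj : List (List Int)) (inc : Option (List Bool)) :
    ∀ (f g : Nat) (s : Int × Int) (b : Bool), pvOK adj inc f s b = true → f ≤ g →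
      tsz adj g s = tsz adj f s := by
  intro f
  induction f with
  | zero => intro g s b h _; simp [pvOK] at h
  | succ f ih =>
      intro g s b h hfg
      match g, hfg with
      | g + 1, hfg =>
          rw [pvOK_succ] at h
          simp only [Bool.and_eq_true, List.all_eq_true] at h
          rw [tsz, tsz]
          congr 1
          apply congrArg
          apply List.map_congr_left
          intro c hc
          exact ih g c (!b) (h.2 c hc) (Nat.le_of_succ_le_succ hfg)

-- fixed-point identity for tsz on pvOK states
theorem tsz_fix (adj : List (List Int)) (inc : Option (List Bool)) (g : Nat)
    (s : Int × Int) (b : Bool) (h : pvOK adj inc g s b = true) :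
    tsz adj g s = 1 + ((chd adj s).map (tsz adj g)).sum := by
  have h1 := tsz_stab adj inc g (g + 1) s b h (Nat.le_succ g)
  rw [← h1, tsz]

theorem tsz_pos (adj : List (List Int)) (g : Nat) (s : Int × Int) : 1 ≤ tsz adj g s := by
  cases g <;> simp [tsz]

-- B's push fold: the filtered children go on top, in reverse, with depth d+1
theorem foldl_push_cons (c p d : Int) (l : List Int) (init : List (Int × Int × Int)) :
    l.foldl (fun st v => if v = p then st else (v, c, d) :: st) init
      = ((l.filter (fun v => v ≠ p)).map (fun v => (v, c, d))).reverse ++ init := by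
  induction l generalizing init with
  | nil => simp
  | cons x xs ih => by_cases h : x = p <;> simp [List.foldl_cons, h, ih]

-- B's stack loop: with per-entry pvOK states and enough fuel for all pops,
-- the loop adds cnt of every stack entry (at the entry's own depth parity)
theorem loopD_spec (adj : List (List Int)) (incP : Option (List Bool)) (g : Nat) :
    ∀ (f : Nat) (stack : List (Int × Int × Int)) (count : Int) (inc : Option (List Bool)),
      (∀ e ∈ stack, pvOK adj incP g (e.1, e.2.1) (decide (e.2.2 % 2 = 0)) = true) →
      ((stack.map (fun e => tsz adj g (e.1, e.2.1))).sum ≤ f) →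
      loopD adj f stack count inc
        = count + (stack.map (fun e => cnt adj g (e.1, e.2.1) (decide (e.2.2 % 2 = 0)))).sum := by
  intro f
  induction f with
  | zero =>
      intro stack count inc _ h2
      match stack with
      | [] => simp [loopD]
      | e :: rest =>
          exfalso
          have := tsz_pos adj g (e.1, e.2.1)
          simp only [List.map_cons, List.sum_cons] at h2
          omega
  | succ f ih =>
      intro stack count inc h1 h2
      match stack with
      | [] => simp [loopD]
      | (curr, parent, depth) :: rest =>
          have hs := h1 (curr, parent, depth) (List.mem_cons_self ..)
          rw [loopD]
          rw [foldl_push_cons]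
          have hchd : ((((PySem.List.pyGet? adj curr).getD []).filter (fun v => v ≠ parent)).map
              (fun v => (v, curr, depth + 1)))
              = (chd adj (curr, parent)).map (fun q => (q.1, q.2, depth + 1)) := by
            simp [chd, List.map_map]
          rw [hchd]
          have hpar : ∀ c : Int × Int, c ∈ chd adj (curr, parent) →
              pvOK adj incP g c (decide ((depth + 1) % 2 = 0)) = true := by
            intro c hc
            rw [parity_step]
            exact pvOK_child adj incP g (curr, parent) (decide (depth % 2 = 0)) hs c hc
          rw [ih]
          · -- arithmetic: regroup the sums
            have hcnt := cnt_fix adj incP g (curr, parent) (decide (depth % 2 = 0)) hs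
            simp only [List.map_cons, List.sum_cons, List.map_append, List.sum_append,
              List.map_reverse, List.sum_reverse, List.map_map]
            rw [hcnt]
            have hmap : ((chd adj (curr, parent)).map
                ((fun e => cnt adj g (e.1, e.2.1) (decide (e.2.2 % 2 = 0))) ∘
                  (fun q => (q.1, q.2, depth + 1))))
                = (chd adj (curr, parent)).map
                    (fun c => cnt adj g c (!decide (depth % 2 = 0))) := by
              apply List.map_congr_left
              intro c _
              show cnt adj g (c.1, c.2) (decide ((depth + 1) % 2 = 0))
                    = cnt adj g c (!decide (depth % 2 = 0))
              rw [parity_step]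
            rw [hmap]
            by_cases hd : depth % 2 = 0 <;> simp [hd] <;> ring
          · intro e he
            rcases List.mem_append.mp he with h | h
            · rcases List.mem_reverse.mp h with h
              rcases List.mem_map.mp h with ⟨c, hc, rfl⟩
              simpa using hpar c hc
            · exact h1 e (List.mem_cons_of_mem _ h)
          · -- fuel: one pop spent, children sizes replace the popped size
            have htsz := tsz_fix adj incP g (curr, parent) (decide (depth % 2 = 0)) hs
            simp only [List.map_cons, List.sum_cons] at h2
            simp only [List.map_append, List.sum_append, List.map_reverse, List.sum_reverse,
              List.map_map]
            have hmap2 : ((chd adj (curr, parent)).map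
                ((fun e => tsz adj g (e.1, e.2.1)) ∘ (fun q => (q.1, q.2, depth + 1))))
                = (chd adj (curr, parent)).map (tsz adj g) := by
              apply List.map_congr_left
              intro c _
              simp [Function.comp]
            rw [hmap2]
            omega

-- ===== VERDICT (by name: the statement is the Claim_ definition above) =====
theorem bfs_spec : Claim_equal_bfs := by
  intro start adj included _ hpre
  show bfs start adj included = bfs_alt start adj included
  unfold bfs bfs_alt
  have hA := whileA_spec adj (pvFuelBfs adj) [(start, -1)] 0 0 included
  have hB := loopD_spec adj included (pvFuelBfs adj)
      (tsz adj (pvFuelBfs adj) (start, -1)) [(start, -1, 0)] 0 included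
      (by intro e he; simp at he; subst he; simpa using hpre)
      (by simp)
  rw [hA, hB]
  simp
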